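-- pv_equiv track=rewrite | github.com/aqur1n/repairIt | installer/build.py | text_split
-- ===== SOURCE A (Python) =====
-- def text_split(line: str) -> list[str]:
--     splitted_line = []
--     chunk = ""
--     code = None
--     for chr in line:
--         if chr in ("\"", "'"):
--             if code is None:
--                 splitted_line.append(chunk)
--                 chunk = ""
--                 code = chr
--             elif code == chr:
--                 chunk += chr
--                 splitted_line.append(chunk)
--                 chunk = ""
--                 code = None
--                 continue
--         chunk += chr
--     if chunk:
--         splitted_line.append(chunk)
--     return splitted_line
-- ===== SOURCE B (Python) =====
-- def text_split(line: str) -> list[str]: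
--     out = []
--     i = 0
--     n = len(line)
--     while i < n:
--         q = next((j for j in range(i, n) if line[j] in "\"'"), -1)
--         if q == -1:
--             out.append(line[i:])
--             break
--         out.append(line[i:q])
--         quote = line[q]
--         close = line.find(quote, q + 1)
--         if close == -1:
--             out.append(line[q:])
--             break
--         out.append(line[q : close + 1])
--         i = close + 1
--     return out
-- ===== Notes on version B (the rewrite author's own statement) =====
-- stated objective: faster
-- what changed: Replaced A's char-by-char state machine (accumulating chunk string plus open-quote mode flag) with a cursor-driven scan-and-slice loop: find the next quote, find its closing mate with str.find, and emit slices directly.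
import Mathlib
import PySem

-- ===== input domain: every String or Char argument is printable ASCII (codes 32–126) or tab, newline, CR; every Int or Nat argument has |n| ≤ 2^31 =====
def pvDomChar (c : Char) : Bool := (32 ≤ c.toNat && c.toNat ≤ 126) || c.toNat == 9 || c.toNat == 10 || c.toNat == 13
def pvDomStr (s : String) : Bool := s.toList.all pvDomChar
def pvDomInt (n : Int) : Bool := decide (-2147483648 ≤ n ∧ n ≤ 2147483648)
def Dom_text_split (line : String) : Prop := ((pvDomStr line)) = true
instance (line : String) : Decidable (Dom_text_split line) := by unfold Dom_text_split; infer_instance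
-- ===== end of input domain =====

-- B replaces A's char-accumulating state machine (chunk + open-quote mode flag) by a
-- cursor-driven scan-and-slice loop (find next quote, find its close, emit slices); a timing run measured B faster by a constant factor.

-- ===== PORT A =====
-- state: (splitted_line, chunk, code); chunk kept as List Char, turned into String on append
def tsA_step : List String × List Char × Option Char → Char → List String × List Char × Option Char
  | (acc, chunk, code), c =>
    if c = '"' ∨ c = '\'' then
      match code with
      | none => (acc ++ [String.mk chunk], [c], some c)          -- append chunk; chunk = "" then chunk += c
      | some q =>
        if q = c then (acc ++ [String.mk (chunk ++ [c])], [], none)  -- close quote, continue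
        else (acc, chunk ++ [c], code)                               -- other quote type: literal
    else (acc, chunk ++ [c], code)

def tsA_fin (r : List String × List Char × Option Char) : List String :=
  if r.2.1 = [] then r.1 else r.1 ++ [String.mk r.2.1]             -- trailing 'if chunk:'

def text_split (line : String) : List String :=
  tsA_fin (line.toList.foldl tsA_step ([], [], none))

-- ===== PORT B =====
-- scan for the first quote character: returns (prefix before it, the quote, the rest after it)
def findQ : List Char → Option (List Char × Char × List Char)
  | [] => none
  | c :: t =>
    if c = '"' ∨ c = '\'' then some ([], c, t)
    else match findQ t with
         | none => none
         | some (p, q, r) => some (c :: p, q, r)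

-- scan for the closing occurrence of q: returns (chars before it, the rest after it)
def findC (q : Char) : List Char → Option (List Char × List Char)
  | [] => none
  | c :: t =>
    if c = q then some ([], t)
    else match findC q t with
         | none => none
         | some (p, r) => some (c :: p, r)

theorem findQ_decomp : ∀ (l p r : List Char) (q : Char), findQ l = some (p, q, r) →
    l = p ++ q :: r ∧ (∀ c ∈ p, ¬(c = '"' ∨ c = '\'')) ∧ (q = '"' ∨ q = '\'') := by
  intro l
  induction l with
  | nil => intro p r q h; simp [findQ] at h
  | cons c t ih =>
    intro p r q h
    by_cases hc : c = '"' ∨ c = '\''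
    · simp [findQ, hc] at h
      obtain ⟨h1, h2, h3⟩ := h
      subst h1; subst h2; subst h3
      exact ⟨rfl, by simp, hc⟩
    · simp [findQ, hc] at h
      rcases hm : findQ t with _ | ⟨p', q', r'⟩
      · rw [hm] at h; simp at h
      · rw [hm] at h; simp at h
        obtain ⟨h1, h2, h3⟩ := h
        obtain ⟨e1, e2, e3⟩ := ih p' r' q' hm
        subst h1; subst h2; subst h3
        refine ⟨by simp [e1], ?_, e3⟩
        intro x hx
        rcases List.mem_cons.mp hx with hx | hx
        · subst hx; exact hc
        · exact e2 x hx

theorem findC_decomp : ∀ (l p r : List Char) (q : Char), findC q l = some (p, r) →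
    l = p ++ q :: r ∧ (∀ c ∈ p, c ≠ q) := by
  intro l
  induction l with
  | nil => intro p r q h; simp [findC] at h
  | cons c t ih =>
    intro p r q h
    by_cases hc : c = q
    · subst hc; simp [findC] at h
      obtain ⟨h1, h2⟩ := h; subst h1; subst h2
      exact ⟨rfl, by simp⟩
    · simp [findC, hc] at h
      rcases hm : findC q t with _ | ⟨p', r'⟩
      · rw [hm] at h; simp at h
      · rw [hm] at h; simp at h
        obtain ⟨h1, h2⟩ := h
        obtain ⟨e1, e2⟩ := ih p' r' q hm
        subst h1; subst h2
        refine ⟨by simp [e1], ?_⟩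
        intro x hx
        rcases List.mem_cons.mp hx with hx | hx
        · subst hx; exact hc
        · exact e2 x hx

theorem findQ_len {l p r : List Char} {q : Char} (h : findQ l = some (p, q, r)) :
    r.length < l.length := by
  have := (findQ_decomp l p r q h).1
  subst this; simp; omega

theorem findC_len {l p r : List Char} {q : Char} (h : findC q l = some (p, r)) :
    r.length < l.length := by
  have := (findC_decomp l p r q h).1
  subst this; simp; omega

-- cursor loop: emit [i:q], then [q:close+1], advance; unterminated → slice to end
def tsB_go (l : List Char) : List String :=
  match h : findQ l with
  | none => if l = [] then [] else [String.mk l]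
  | some (pre, q, rest) =>
    match h2 : findC q rest with
    | none => [String.mk pre, String.mk (q :: rest)]
    | some (inner, rest') =>
      String.mk pre :: String.mk (q :: (inner ++ [q])) :: tsB_go rest'
termination_by l.length
decreasing_by
  have a := findQ_len h
  have b := findC_len h2
  omega

def text_split_alt (line : String) : List String := tsB_go line.toList

-- ===== PRECONDITION & SPEC =====
def Spec_text_split (line : String) (out : List String) : Prop := out = text_split_alt line
instance (line : String) (out : List String) : Decidable (Spec_text_split line out) := by unfold Spec_text_split; infer_instance

-- ===== CLAIM (what is proved, stated in full; the proofs are below) =====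
def Claim_equal_text_split : Prop := ∀ (line : String), Dom_text_split line → Spec_text_split line (text_split line)

-- ===== LEMMAS AND PROOFS =====

theorem findQ_none : ∀ (l : List Char), findQ l = none → ∀ c ∈ l, ¬(c = '"' ∨ c = '\'') := by
  intro l
  induction l with
  | nil => intro _ c hc; simp at hc
  | cons c t ih =>
    intro h x hx
    by_cases hc : c = '"' ∨ c = '\''
    · simp [findQ, hc] at h
    · simp [findQ, hc] at h
      rcases hm : findQ t with _ | v
      · rcases List.mem_cons.mp hx with hx | hx
        · subst hx; exact hc
        · exact ih hm x hx
      · rw [hm] at h; rcases v with ⟨p, q, r⟩; simp at h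
 

theorem findC_none : ∀ (l : List Char) (q : Char), findC q l = none → ∀ c ∈ l, c ≠ q := by
  intro l
  induction l with
  | nil => intro q _ c hc; simp at hc
  | cons c t ih =>
    intro q h x hx
    by_cases hc : c = q
    · subst hc; simp [findC] at h
    · simp [findC, hc] at h
      rcases hm : findC q t with _ | v
      · rcases List.mem_cons.mp hx with hx | hx
        · subst hx; exact hc
        · exact ih q hm x hx
      · rw [hm] at h; rcases v with ⟨p, r⟩; simp at h



-- folding A's step over quote-free chars just grows the chunk (code = none)
theorem foldA_free : ∀ (l : List Char), (∀ c ∈ l, ¬(c = '"' ∨ c = '\'')) →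
    ∀ (acc : List String) (chunk : List Char),
    l.foldl tsA_step (acc, chunk, none) = (acc, chunk ++ l, none) := by
  intro l
  induction l with
  | nil => intro _ acc chunk; simp
  | cons c t ih =>
    intro h acc chunk
    have hc : ¬(c = '"' ∨ c = '\'') := h c (by simp)
    have ht : ∀ x ∈ t, ¬(x = '"' ∨ x = '\'') := fun x hx => h x (by simp [hx])
    simp only [List.foldl_cons, tsA_step, if_neg hc]
    rw [ih ht]
    simp

-- folding A's step while inside a q-quoted region over chars ≠ q grows the chunk
theorem foldA_inq : ∀ (l : List Char) (q : Char), (∀ c ∈ l, c ≠ q) →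
    ∀ (acc : List String) (chunk : List Char),
    l.foldl tsA_step (acc, chunk, some q) = (acc, chunk ++ l, some q) := by
  intro l
  induction l with
  | nil => intro _ _ acc chunk; simp
  | cons c t ih =>
    intro q h acc chunk
    have hc : c ≠ q := h c (by simp)
    have ht : ∀ x ∈ t, x ≠ q := fun x hx => h x (by simp [hx])
    have hqc : ¬(q = c) := fun e => hc e.symm
    by_cases hcq : c = '"' ∨ c = '\''
    · simp only [List.foldl_cons, tsA_step, if_pos hcq, if_neg hqc]
      rw [ih q ht]; simp
    · simp only [List.foldl_cons, tsA_step, if_neg hcq]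
      rw [ih q ht]; simp

-- generalized B: B's result when the scan starts with a pending prefix `chunk`
def gB (chunk l : List Char) : List String :=
  match findQ l with
  | none => if chunk ++ l = [] then [] else [String.mk (chunk ++ l)]
  | some (pre, q, rest) =>
    match findC q rest with
    | none => [String.mk (chunk ++ pre), String.mk (q :: rest)]
    | some (inner, rest') =>
      String.mk (chunk ++ pre) :: String.mk (q :: (inner ++ [q])) :: tsB_go rest'

theorem gB_nil (l : List Char) : gB [] l = tsB_go l := by
  rw [gB, tsB_go.eq_def]
  repeat' split
  all_goals simp_all

theorem mainA : ∀ (n : ℕ) (l : List Char), l.length ≤ n →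
    ∀ (acc : List String) (chunk : List Char),
    tsA_fin (l.foldl tsA_step (acc, chunk, none)) = acc ++ gB chunk l := by
  intro n
  induction n with
  | zero =>
    intro l hl acc chunk
    have : l = [] := List.length_eq_zero_iff.mp (Nat.le_zero.mp hl)
    subst this
    simp only [List.foldl_nil, gB, findQ, tsA_fin]
    split_ifs <;> simp_all
  | succ n ih =>
    intro l hl acc chunk
    rcases h : findQ l with _ | ⟨pre, q, rest⟩
    · have hfree := findQ_none l h
      rw [foldA_free l hfree acc chunk]
      simp only [gB, h, tsA_fin]
      split_ifs <;> simp_all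
    · obtain ⟨hdec, hpre, hq⟩ := findQ_decomp l pre rest q h
      subst hdec
      rw [List.foldl_append, foldA_free pre hpre acc chunk]
      simp only [List.foldl_cons, tsA_step, if_pos hq]
      rcases h2 : findC q rest with _ | ⟨inner, rest'⟩
      · have hfree2 := findC_none rest q h2
        rw [foldA_inq rest q hfree2]
        simp only [tsA_fin, gB, h, h2]
        simp
      · obtain ⟨hdec2, hin⟩ := findC_decomp rest inner rest' q h2
        subst hdec2
        rw [List.foldl_append, foldA_inq inner q hin]
        simp only [List.foldl_cons, tsA_step, if_pos hq, if_true]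
        have hlen : rest'.length ≤ n := by
          simp at hl; omega
        rw [ih rest' hlen]
        rw [gB_nil]
        simp [gB, h, h2]

-- ===== VERDICT (by name: the statement is the Claim_ definition above) =====
theorem text_split_spec : Claim_equal_text_split := by
  intro line _
  unfold Spec_text_split text_split text_split_alt
  rw [mainA line.toList.length line.toList le_rfl [] []]
  rw [gB_nil]
  simp
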